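-- pv_equiv track=rewrite | github.com/Rudxain/partition-jumper | src/ref.py | xor_p
-- ===== SOURCE A (Python) =====
-- def bisect_right_p(a: list[int], x: int, lo: int):
-- 	"""Return the index where to insert item `x` in `a`, assuming `a` is partitioned and
-- 	all `e` in `a[j:lo]` have `e == x`.
--
-- 	The return value `i` is such that all `e` in `a[i:]` have `e != x`.
-- 	So if `x` already appears in the list, `a.insert(i, x)` will
-- 	insert just after the rightmost `x` already there.
--
-- 	Arg `lo` bounds the slice of `a` to be searched.
-- 	This is needed to avoid incorrect behavior if all `e` in `a[:j]` have `e != x`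
-- 	"""
-- 	if lo < 0:
-- 		raise ValueError('lo must be non-negative')
-- 	hi = len(a)
-- 	if x == a[-1]:
-- 		return hi
-- 	while lo < hi:
-- 		mid = (lo + hi) // 2
-- 		if x != a[mid]:
-- 			hi = mid
-- 		else:
-- 			lo = mid + 1
-- 	return lo
--
-- def xor_p(s: list[int]):
-- 	'''`s` is assumed to be partitioned.
-- 	'''
-- 	acc = 0
-- 	cur_part_start = 0
-- 	while cur_part_start < len(s):
-- 		target = s[cur_part_start]
-- 		next_part_start = bisect_right_p(s, target, lo=cur_part_start + 1)
-- 		run_len = next_part_start - cur_part_start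
-- 		acc ^= (run_len & 1) * target
-- 		cur_part_start = next_part_start
-- 	return acc
-- ===== SOURCE B (Python) =====
-- def xor_p(s: list[int]):
-- 	'''`s` is assumed to be partitioned.
--
-- 	The XOR of a run of equal values v of length L is v when L is odd and
-- 	0 when L is even, so on a partitioned list the answer is simply the
-- 	XOR of all elements: one pass, no searching.
-- 	'''
-- 	acc = 0
-- 	for v in s:
-- 		acc ^= v
-- 	return acc
-- ===== Notes on version B (the rewrite author's own statement) =====
-- stated objective: faster
-- what changed: B replaces the run-finding outer loop with binary searches by a single XOR-fold over all elements, using the identity that a run of equal values cancels to its value iff its length is odd.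
-- outside the precondition, e.g. on xor_p([1, 2, 1]): A returns 1, B returns 2
import Mathlib
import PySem

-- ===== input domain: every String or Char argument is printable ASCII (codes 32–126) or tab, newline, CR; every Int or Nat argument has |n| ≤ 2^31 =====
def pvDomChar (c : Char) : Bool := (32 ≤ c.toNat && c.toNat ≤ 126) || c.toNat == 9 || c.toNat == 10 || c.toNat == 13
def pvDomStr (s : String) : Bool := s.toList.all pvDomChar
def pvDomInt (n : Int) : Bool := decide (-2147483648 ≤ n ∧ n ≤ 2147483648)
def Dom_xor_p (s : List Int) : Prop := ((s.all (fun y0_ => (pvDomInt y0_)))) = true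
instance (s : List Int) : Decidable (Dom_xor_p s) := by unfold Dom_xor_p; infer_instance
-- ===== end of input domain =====

-- B replaces A's run-finding loop with binary searches by a single XOR-fold over
-- all elements (a run of equal values XORs to its value iff its length is odd);
-- equal on partitioned lists, the precondition A's own docstring states.


-- ===== PORT A =====
-- the `while lo < hi` loop of bisect_right_p; the fuel only makes it total
-- (each step shrinks hi - lo by at least one, so fuel = (hi - lo).toNat suffices)
def bisectLoopA (fuel : Nat) (a : List Int) (x lo hi : Int) : Int :=
  match fuel with
  | 0 => lo
  | fuel + 1 =>
    if lo < hi then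
      let mid := PySem.Int.floordiv (lo + hi) 2
      if x ≠ PySem.List.pyGetD a mid 0 then bisectLoopA fuel a x lo mid
      else bisectLoopA fuel a x (mid + 1) hi
    else lo

-- bisect_right_p; the `lo < 0` ValueError branch and the IndexError of a[-1] on an
-- empty list are unreachable from xor_p (it calls with 0 ≤ cur < len, lo = cur + 1)
def bisectA (a : List Int) (x lo : Int) : Int :=
  if lo < 0 then lo
  else
    let hi : Int := a.length
    if x = PySem.List.pyGetD a (-1) 0 then hi
    else bisectLoopA (hi - lo).toNat a x lo hi

-- the `while cur_part_start < len(s)` loop of xor_p; fuel = len s + 1 suffices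
-- since each iteration advances cur_part_start by at least one
def xorLoopA (fuel : Nat) (s : List Int) (acc cur : Int) : Int :=
  match fuel with
  | 0 => acc
  | fuel + 1 =>
    if cur < (s.length : Int) then
      let target := PySem.List.pyGetD s cur 0
      let next := bisectA s target (cur + 1)
      let runLen := next - cur
      xorLoopA fuel s (PySem.Int.bxor acc (PySem.Int.band runLen 1 * target)) next
    else acc

def xor_p (s : List Int) : Int := xorLoopA (s.length + 1) s 0 0

-- ===== PORT B =====
def xor_p_alt (s : List Int) : Int := s.foldl (fun acc v => PySem.Int.bxor acc v) 0

-- ===== PRECONDITION & SPEC =====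
-- Pre_ is A's documented precondition: `s` is partitioned (equal elements are
-- contiguous). On a non-partitioned list bisect_right_p's binary search probes
-- data violating its contract and the index it returns is path-dependent, a
-- value of A's implementation nobody would specify; B XORs all elements there.
def Pre_xor_p (s : List Int) : Prop :=
  ∀ k, k < s.length → ∀ j, j < k → ∀ i, i < j →
    s.getD i 0 = s.getD k 0 → s.getD j 0 = s.getD k 0
instance (s : List Int) : Decidable (Pre_xor_p s) := by unfold Pre_xor_p; infer_instance

def pvWitness_xor_p : List Int := [4, 4, 7, -2, -2, -2]

def Spec_xor_p (s : List Int) (out : Int) : Prop := out = xor_p_alt s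
instance (s : List Int) (out : Int) : Decidable (Spec_xor_p s out) := by unfold Spec_xor_p; infer_instance

-- ===== CLAIM (what is proved, stated in full; the proofs are below) =====
def Claim_equal_xor_p : Prop := ∀ (s : List Int), Dom_xor_p s → Pre_xor_p s → Spec_xor_p s (xor_p s)

-- ===== LEMMAS AND PROOFS =====

theorem bxor_nn (a b : Int) (ha : 0 ≤ a) (hb : 0 ≤ b) :
    PySem.Int.bxor a b = ((a.toNat ^^^ b.toNat : Nat) : Int) := by
  simp [PySem.Int.bxor, ha, hb]

theorem bxor_np (a b : Int) (ha : 0 ≤ a) (hb : b < 0) :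
    PySem.Int.bxor a b = -((a.toNat ^^^ (-b-1).toNat : Nat) : Int) - 1 := by
  simp [PySem.Int.bxor, ha, not_le.2 hb]

theorem bxor_pn (a b : Int) (ha : a < 0) (hb : 0 ≤ b) :
    PySem.Int.bxor a b = -(((-a-1).toNat ^^^ b.toNat : Nat) : Int) - 1 := by
  simp [PySem.Int.bxor, not_le.2 ha, hb]

theorem bxor_pp (a b : Int) (ha : a < 0) (hb : b < 0) :
    PySem.Int.bxor a b = (((-a-1).toNat ^^^ (-b-1).toNat : Nat) : Int) := by
  simp [PySem.Int.bxor, not_le.2 ha, not_le.2 hb]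

-- XORing the same value twice is the identity
theorem bxor_cancel (a x : Int) : PySem.Int.bxor (PySem.Int.bxor a x) x = a := by
  by_cases ha : 0 ≤ a <;> by_cases hx : 0 ≤ x
  · rw [bxor_nn a x ha hx, bxor_nn _ x (by positivity) hx]
    simp [Nat.xor_xor_cancel_right, Int.toNat_of_nonneg ha]
  · rw [bxor_np a x ha (by omega), bxor_pp _ x (by omega) (by omega)]
    have : (-(-((a.toNat ^^^ (-x-1).toNat : Nat) : Int) - 1) - 1).toNat = a.toNat ^^^ (-x-1).toNat := by omega
    rw [this, Nat.xor_xor_cancel_right, Int.toNat_of_nonneg ha]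
  · rw [bxor_pn a x (by omega) hx, bxor_pn _ x (by omega) hx]
    have : (-(-(((-a-1).toNat ^^^ x.toNat : Nat) : Int) - 1) - 1).toNat = (-a-1).toNat ^^^ x.toNat := by omega
    rw [this, Nat.xor_xor_cancel_right]
    omega
  · rw [bxor_pp a x (by omega) (by omega), bxor_np _ x (by positivity) (by omega)]
    rw [Int.toNat_natCast, Nat.xor_xor_cancel_right]
    omega

theorem band_natCast_one (c : Nat) : PySem.Int.band (c : Int) 1 = ((c % 2 : Nat) : Int) := by
  have h := PySem.Int.band_natCast c 1
  simpa [Nat.and_one_is_mod] using h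

-- a fold of XOR over a constant run: the value survives iff the length is odd
theorem foldl_bxor_replicate (c : Nat) (x acc : Int) :
    (List.replicate c x).foldl (fun a v => PySem.Int.bxor a v) acc
      = PySem.Int.bxor acc (PySem.Int.band (c : Int) 1 * x) := by
  induction c generalizing acc with
  | zero =>
    rw [show PySem.Int.band ((0:Nat):Int) 1 = 0 from by decide]
    simp [PySem.Int.bxor_zero]
  | succ c ih =>
    rw [List.replicate_succ, List.foldl_cons, ih]
    rw [band_natCast_one, band_natCast_one]
    rcases Nat.even_or_odd c with hc | hc
    · have h1 : c % 2 = 0 := Nat.even_iff.1 hc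
      have h2 : (c + 1) % 2 = 1 := by omega
      simp [h1, h2]
    · have h1 : c % 2 = 1 := Nat.odd_iff.1 hc
      have h2 : (c + 1) % 2 = 0 := by omega
      simp [h1, h2, bxor_cancel]

-- splitting a constant prefix off the suffix s.drop cur
theorem drop_eq_replicate_append (s : List Int) (cur e : Nat) (x : Int)
    (hce : cur ≤ e) (hen : e ≤ s.length)
    (hx : ∀ m, cur ≤ m → m < e → s.getD m 0 = x) :
    s.drop cur = List.replicate (e - cur) x ++ s.drop e := by
  apply List.ext_getElem
  · simp; omega
  · intro i h1 h2
    rw [List.getElem_drop]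
    by_cases hi : i < e - cur
    · rw [List.getElem_append_left (by simpa using hi), List.getElem_replicate]
      have := hx (cur + i) (by omega) (by omega)
      rwa [List.getD_eq_getElem _ _ (by simp at h1; omega)] at this
    · rw [List.getElem_append_right (by simpa using hi)]
      rw [List.getElem_drop]
      congr 1
      · simp; omega

-- binary-search correctness: if on [lo, hi) "equals x" holds exactly below e,
-- the loop returns e
theorem bisectLoopA_eq (s : List Int) (x : Int) :
    ∀ (fuel : Nat) (lo hi e : Int), (hi - lo).toNat ≤ fuel → 0 ≤ lo → hi ≤ (s.length : Int) →
    lo ≤ e → e ≤ hi →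
    (∀ m : Int, lo ≤ m → m < hi → (s.getD m.toNat 0 = x ↔ m < e)) →
    bisectLoopA fuel s x lo hi = e := by
  intro fuel
  induction fuel with
  | zero =>
    intro lo hi e hf hlo hhi hle heh _
    simp only [bisectLoopA]
    omega
  | succ fuel ih =>
    intro lo hi e hf hlo hhi hle heh hiff
    simp only [bisectLoopA]
    by_cases hlh : lo < hi
    · simp only [hlh, if_true]
      set mid := PySem.Int.floordiv (lo + hi) 2 with hmid
      obtain ⟨hm1, _⟩ := PySem.Int.floordiv_two_mid_bounds (le_of_lt hlh)
      have hm2 : mid < hi := by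
        rw [hmid, PySem.Int.floordiv_lt_iff_lt_mul (by omega)]
        omega
      have hmem : PySem.List.pyGetD s mid 0 = s.getD mid.toNat 0 := by
        rw [PySem.List.pyGetD_eq_getElem s 0 (by omega) (by omega)]
        rw [List.getD_eq_getElem _ _ (by omega)]
      by_cases hxm : x = s.getD mid.toNat 0
      · rw [if_neg (by rw [hmem]; exact not_not_intro hxm)]
        have hmide : mid < e := (hiff mid (by omega) hm2).1 hxm.symm
        exact ih (mid + 1) hi e (by omega) (by omega) hhi (by omega) heh
          (fun m hm1' hm2' => hiff m (by omega) hm2')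
      · rw [if_pos (by rw [hmem]; exact hxm)]
        have hemid : e ≤ mid := by
          by_contra hc
          exact hxm ((hiff mid (by omega) hm2).2 (by omega)).symm
        exact ih lo mid e (by omega) hlo (by omega) hle (by omega)
          (fun m hm1' hm2' => hiff m hm1' (by omega))
    · simp only [hlh, if_false]
      omega

-- the main loop invariant: from position cur, A's loop XOR-folds the suffix
theorem xorLoopA_eq (s : List Int) (hp : Pre_xor_p s) :
    ∀ (fuel : Nat) (cur : Nat) (acc : Int), s.length - cur ≤ fuel → cur ≤ s.length →
    xorLoopA fuel s acc (cur : Int) = (s.drop cur).foldl (fun a v => PySem.Int.bxor a v) acc := by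
  intro fuel
  induction fuel with
  | zero =>
    intro cur acc hf hc
    have : cur = s.length := by omega
    subst this
    simp [xorLoopA, List.drop_length]
  | succ fuel ih =>
    intro cur acc hf hc
    by_cases hcur : cur < s.length
    · have hguard : (cur : Int) < (s.length : Int) := by exact_mod_cast hcur
      simp only [xorLoopA, if_pos hguard, PySem.List.pyGetD_natCast]
      set x := s.getD cur 0 with hxdef
      have hne : s ≠ [] := by
        intro h; rw [h] at hcur; simp at hcur
      have hlast : PySem.List.pyGetD s (-1) 0 = s.getD (s.length - 1) 0 := by
        rw [PySem.List.pyGetD_neg_one s 0 hne, List.getD_eq_getElem _ _ (by omega)]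
        exact List.getLast_eq_getElem hne
      by_cases hA : x = s.getD (s.length - 1) 0
      · -- the a[-1] == x shortcut: the run extends to the end of the list
        have hall : ∀ m, cur ≤ m → m < s.length → s.getD m 0 = x := by
          intro m h1 h2
          rcases eq_or_lt_of_le h1 with h1' | h1'
          · rw [← h1']
          · by_cases hm : m = s.length - 1
            · rw [hm]; exact hA.symm
            · have := hp (s.length - 1) (by omega) m (by omega) cur (by omega)
                (by rw [← hxdef, ← hA])
              rw [this, ← hA]
        have hbis : bisectA s x ((cur : Int) + 1) = (s.length : Int) := by
          unfold bisectA
          rw [if_neg (by omega), if_pos (by rw [hlast]; exact hA)]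
        rw [hbis]
        have := ih s.length (PySem.Int.bxor acc
          (PySem.Int.band ((s.length : Int) - (cur : Int)) 1 * x)) (by omega) le_rfl
        rw [this, List.drop_length, List.foldl_nil]
        rw [drop_eq_replicate_append s cur s.length x (le_of_lt hcur) le_rfl hall,
          List.drop_length, List.append_nil, foldl_bxor_replicate,
          show ((s.length : Int) - (cur : Int)) = (((s.length - cur : Nat)) : Int) from by omega]
      · -- binary search: it returns the least e > cur ending the run
        have hex : ∃ j, cur < j ∧ (j = s.length ∨ s.getD j 0 ≠ x) :=
          ⟨s.length, hcur, Or.inl rfl⟩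
        set e := Nat.find hex with hedef
        obtain ⟨he1, he3⟩ := Nat.find_spec hex
        have he2 : e ≤ s.length := Nat.find_min' hex ⟨hcur, Or.inl rfl⟩
        have he4 : ∀ m, cur < m → m < e → s.getD m 0 = x := by
          intro m h1 h2
          have := Nat.find_min hex h2
          simp only [not_and, not_or, not_not] at this
          exact (this h1).2
        have hge : ∀ m, e ≤ m → m < s.length → s.getD m 0 ≠ x := by
          intro m h1 h2 hmx
          rcases eq_or_lt_of_le h1 with h1' | h1'
          · rcases he3 with h | h
            · omega
            · rw [← h1'] at hmx; exact h hmx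
          · rcases he3 with h | h
            · omega
            · have := hp m h2 e h1' cur (by omega) (by rw [← hxdef, hmx])
              rw [hmx] at this; exact h this
        have hbis : bisectA s x ((cur : Int) + 1) = (e : Int) := by
          unfold bisectA
          rw [if_neg (by omega), if_neg (by rw [hlast]; exact hA)]
          apply bisectLoopA_eq s x _ _ _ _ le_rfl (by omega) le_rfl
            (by exact_mod_cast Nat.succ_le_of_lt he1) (by exact_mod_cast he2)
          intro m hm1 hm2
          have hm0 : 0 ≤ m := by omega
          constructor
          · intro hmx
            by_contra hcon
            exact hge m.toNat (by omega) (by omega) hmx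
          · intro hme
            exact he4 m.toNat (by omega) (by omega)
        rw [hbis]
        have := ih e (PySem.Int.bxor acc
          (PySem.Int.band ((e : Int) - (cur : Int)) 1 * x)) (by omega) he2
        rw [this]
        have hx' : ∀ m, cur ≤ m → m < e → s.getD m 0 = x := by
          intro m h1 h2
          rcases eq_or_lt_of_le h1 with h1' | h1'
          · rw [← h1']
          · exact he4 m h1' h2
        rw [drop_eq_replicate_append s cur e x (by omega) he2 hx',
          List.foldl_append, foldl_bxor_replicate,
          show ((e : Int) - (cur : Int)) = (((e - cur : Nat)) : Int) from by omega]
    · have : cur = s.length := by omega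
      subst this
      simp [xorLoopA, List.drop_length]

-- ===== VERDICT (by name: the statement is the Claim_ definition above) =====
theorem xor_p_spec : Claim_equal_xor_p := by
  intro s _ hp
  unfold Spec_xor_p xor_p xor_p_alt
  have := xorLoopA_eq s hp (s.length + 1) 0 0 (by omega) (by omega)
  simpa using this
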